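-- pv_equiv track=rewrite | github.com/ElkeVSant/AdventOfCode2024 | day5/main.py | divide_updates
-- ===== SOURCE A (Python) =====
-- def divide_updates(
--     updates: list[list[int]], rules: list[list[int]]
-- ) -> tuple[list, list]:
--     correct_updates = []
--     corrected_updates = []
--     for update in updates:
--         verification, rule = verify(update, rules)
--         if verification:
--             correct_updates.append(update)
--         else:
--             while not verification:
--                 assert rule
--                 update = correct(update, rule)
--                 verification, rule = verify(update, rules)
--             corrected_updates.append(update)
--     return correct_updates, corrected_updates
--
-- def verify(update: list[int], rules: list[list[int]]) -> tuple[bool, list[int] | None]: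
--     for rule in rules:
--         if rule[0] in update and rule[1] in update:
--             if update.index(rule[0]) > update.index(rule[1]):
--                 return False, rule
--     return True, None
--
-- def correct(update: list[int], rule: list[int]) -> list[int]:
--     first = update.index(rule[1])
--     second = update.index(rule[0])
--     return (
--         update[:first]
--         + update[first + 1 : second + 1]
--         + [rule[1]]
--         + update[second + 1 :]
--     )
-- ===== SOURCE B (Python) =====
-- def divide_updates(
--     updates: list[list[int]], rules: list[list[int]]
-- ) -> tuple[list, list]:
--     # Build the rule-pair set once; classify each update with an O(1)-lookup position
--     # table instead of repeated rule scans with list.index; reorder by one stable sort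
--     # on predecessor count instead of A's iterated verify/correct repair loop.
--     pairs = {(r[0], r[1]) for r in rules if len(r) >= 2}
--     correct_updates = []
--     corrected_updates = []
--     for update in updates:
--         pos = {}
--         for i, x in enumerate(update):
--             if x not in pos:
--                 pos[x] = i
--         if all(not (a in pos and b in pos and pos[a] > pos[b]) for (a, b) in pairs):
--             correct_updates.append(update)
--         else:
--             corrected_updates.append(
--                 sorted(update, key=lambda x: sum(1 for y in update if (y, x) in pairs))
--             )
--     return correct_updates, corrected_updates
-- ===== Notes on version B (the rewrite author's own statement) =====
-- stated objective: faster
-- what changed: Instead of A's verify/correct repair loop (which rescans all rules and recomputes list.index after every single element move), B builds the rule-pair set once, classifies each update with a position dictionary in one pass over the rules, and reorders a bad update with a single stable sort by predecessor count.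
-- outside the precondition, e.g. on divide_updates([[2, 1, 3]], [[1, 2], [3, 1]]): A returns ([], [[3, 1, 2]]), B returns ([], [[3, 2, 1]]); on divide_updates([[2, 1, 1]], [[1, 2]]): A returns ([], [[1, 2, 1]]), B returns ([], [[1, 1, 2]])
import Mathlib
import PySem

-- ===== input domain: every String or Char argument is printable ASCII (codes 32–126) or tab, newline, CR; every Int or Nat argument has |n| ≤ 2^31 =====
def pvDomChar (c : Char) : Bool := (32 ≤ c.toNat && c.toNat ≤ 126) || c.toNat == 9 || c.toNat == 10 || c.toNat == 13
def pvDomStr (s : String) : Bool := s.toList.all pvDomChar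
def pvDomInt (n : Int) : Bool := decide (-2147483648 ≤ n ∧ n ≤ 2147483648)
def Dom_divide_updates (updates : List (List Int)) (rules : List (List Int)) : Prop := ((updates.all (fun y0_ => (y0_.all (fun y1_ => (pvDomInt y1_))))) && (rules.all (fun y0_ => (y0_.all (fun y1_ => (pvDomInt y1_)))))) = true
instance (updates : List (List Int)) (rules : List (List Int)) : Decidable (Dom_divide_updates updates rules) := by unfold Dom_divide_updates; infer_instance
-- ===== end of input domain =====

-- B replaces A's iterated verify/correct repair loop by one stable sort of each update
-- by predecessor count over a rule-pair set built once (objective: faster).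

-- ===== PORT A =====
-- verify(update, rules): first violated rule, scanning rules in order
def verifyA (update : List Int) : List (List Int) → Bool × Option (List Int)
  | [] => (true, none)
  | rule :: rs =>
    if update.contains (PySem.List.pyGetD rule 0 0) && update.contains (PySem.List.pyGetD rule 1 0) then
      if (PySem.List.index? update (PySem.List.pyGetD rule 0 0)).getD 0
           > (PySem.List.index? update (PySem.List.pyGetD rule 1 0)).getD 0 then
        (false, some rule)
      else verifyA update rs
    else verifyA update rs

-- correct(update, rule): move rule[1] to just after rule[0]
def correctA (update : List Int) (rule : List Int) : List Int :=
  let first := (PySem.List.index? update (PySem.List.pyGetD rule 1 0)).getD 0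
  let second := (PySem.List.index? update (PySem.List.pyGetD rule 0 0)).getD 0
  PySem.List.slice update none (some (first : Int))
    ++ PySem.List.slice update (some ((first : Int) + 1)) (some ((second : Int) + 1))
    ++ [PySem.List.pyGetD rule 1 0]
    ++ PySem.List.slice update (some ((second : Int) + 1)) none

-- the `while not verification` loop; the fuel only totalizes the recursion
-- (under Pre_ the loop is proved to stop strictly before the fuel runs out)
def whileA (rules : List (List Int)) : Nat → List Int → List Int → List Int
  | 0, update, _ => update
  | fuel+1, update, rule =>
    let update' := correctA update rule
    match verifyA update' rules with
    | (true, _) => update'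
    | (false, rule') => whileA rules fuel update' (rule'.getD [])

-- body of A's `for update in updates` loop
def stepA (rules : List (List Int)) (acc : List (List Int) × List (List Int))
    (update : List Int) : List (List Int) × List (List Int) :=
  match verifyA update rules with
  | (true, _) => (acc.1 ++ [update], acc.2)
  | (false, rule) =>
      (acc.1, acc.2 ++ [whileA rules ((update.length + 1) ^ (update.length + 2)) update (rule.getD [])])

def divide_updates (updates : List (List Int)) (rules : List (List Int)) :
    List (List Int) × List (List Int) :=
  updates.foldl (stepA rules) ([], [])

-- ===== PORT B =====
-- pairs = {(r[0], r[1]) for r in rules if len(r) >= 2}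
def pairsB (rules : List (List Int)) : PySem.Set (Int × Int) :=
  PySem.Set.ofList ((rules.filter (fun r => 2 ≤ r.length)).map
    (fun r => (PySem.List.pyGetD r 0 0, PySem.List.pyGetD r 1 0)))

-- pos = {}; for i, x in enumerate(update): if x not in pos: pos[x] = i
def posB (update : List Int) : PySem.Dict Int Int :=
  (PySem.List.enumerate update 0).foldl
    (fun pos p => if pos.contains p.2 then pos else pos.insert p.2 p.1) PySem.Dict.empty

-- all(not (a in pos and b in pos and pos[a] > pos[b]) for (a, b) in pairs)
-- (pos[a] / pos[b] are reached only under the `in` guards, so getD is exact here)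
def okB (rules : List (List Int)) (update : List Int) : Bool :=
  (pairsB rules).all (fun p =>
    !((posB update).contains p.1 && (posB update).contains p.2 &&
      ((posB update).getD p.1 0 > (posB update).getD p.2 0)))

-- key(x) = sum(1 for y in update if (y, x) in pairs)
def keyB (rules : List (List Int)) (update : List Int) (x : Int) : Int :=
  (update.countP (fun y => PySem.Set.contains (pairsB rules) (y, x)) : Int)

-- body of B's `for update in updates` loop
def stepB (rules : List (List Int)) (acc : List (List Int) × List (List Int))
    (update : List Int) : List (List Int) × List (List Int) :=
  if okB rules update then (acc.1 ++ [update], acc.2)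
  else (acc.1, acc.2 ++ [PySem.List.sorted update (keyB rules update)])

def divide_updates_alt (updates : List (List Int)) (rules : List (List Int)) :
    List (List Int) × List (List Int) :=
  updates.foldl (stepB rules) ([], [])

-- ===== PRECONDITION & SPEC =====
-- (x, y) is an ordering rule of the input (a rule list with at least two entries)
def edgeB (rules : List (List Int)) (x y : Int) : Bool :=
  rules.any (fun r => decide (2 ≤ r.length) &&
    (PySem.List.pyGetD r 0 0 == x) && (PySem.List.pyGetD r 1 0 == y))

-- the rules are a strict total order on the elements of one update (and it has no duplicates)
def PreU (rules : List (List Int)) (u : List Int) : Prop :=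
  u.Nodup ∧
  (∀ x ∈ u, ∀ y ∈ u, x ≠ y → (edgeB rules x y = true ∨ edgeB rules y x = true)) ∧
  (∀ x ∈ u, ∀ y ∈ u, ¬(edgeB rules x y = true ∧ edgeB rules y x = true)) ∧
  (∀ x ∈ u, ∀ y ∈ u, ∀ z ∈ u, edgeB rules x y = true → edgeB rules y z = true → edgeB rules x z = true)

-- no rule raises an IndexError on this update: every rule is nonempty, and a
-- one-entry rule's head is not in the update (Python reads rule[1] only then)
def ruleOkU (rules : List (List Int)) (u : List Int) : Prop :=
  ∀ r ∈ rules, 1 ≤ r.length ∧ (r.length = 1 → PySem.List.pyGetD r 0 0 ∉ u)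

-- the update already respects every applicable rule (A keeps it unchanged)
def noViolU (rules : List (List Int)) (u : List Int) : Prop :=
  ∀ r ∈ rules, 2 ≤ r.length → PySem.List.pyGetD r 0 0 ∈ u → PySem.List.pyGetD r 1 0 ∈ u →
    ¬ u.idxOf (PySem.List.pyGetD r 1 0) < u.idxOf (PySem.List.pyGetD r 0 0)

-- Pre_ excludes inputs where a rule read raises IndexError, and updates that DO need reordering
-- but have duplicate pages or pages the rules do not order strictly and totally: there the value
-- A's first-violated-rule repair loop converges to (if it terminates at all) is an accident of
-- A's scan order.
def Pre_divide_updates (updates : List (List Int)) (rules : List (List Int)) : Prop :=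
  ∀ u ∈ updates, ruleOkU rules u ∧ (noViolU rules u ∨ PreU rules u)

instance (updates : List (List Int)) (rules : List (List Int)) :
    Decidable (Pre_divide_updates updates rules) := by
  unfold Pre_divide_updates ruleOkU noViolU PreU; infer_instance

def pvWitness_divide_updates : List (List Int) × List (List Int) := ([[2, 1], [1, 2]], [[1, 2]])

def Spec_divide_updates (updates : List (List Int)) (rules : List (List Int))
    (out : List (List Int) × List (List Int)) : Prop := out = divide_updates_alt updates rules
instance (updates : List (List Int)) (rules : List (List Int)) (out : List (List Int) × List (List Int)) :
    Decidable (Spec_divide_updates updates rules out) := by unfold Spec_divide_updates; infer_instance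

-- ===== CLAIM (what is proved, stated in full; the proofs are below) =====
def Claim_equal_divide_updates : Prop := ∀ (updates : List (List Int)) (rules : List (List Int)), Dom_divide_updates updates rules → Pre_divide_updates updates rules → Spec_divide_updates updates rules (divide_updates updates rules)

-- ===== LEMMAS AND PROOFS =====

-- `rule` is violated in `v` (the Python condition of verify's inner if)
def violP (v : List Int) (r : List Int) : Prop :=
  PySem.List.pyGetD r 0 0 ∈ v ∧ PySem.List.pyGetD r 1 0 ∈ v ∧
    v.idxOf (PySem.List.pyGetD r 1 0) < v.idxOf (PySem.List.pyGetD r 0 0)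

-- rank of x: how many of u's entries must precede x
def KB (rules : List (List Int)) (u : List Int) (x : Int) : Nat :=
  u.countP (fun y => PySem.Set.contains (pairsB rules) (y, x))

-- weight of x for the termination measure
def WB (rules : List (List Int)) (u : List Int) (x : Int) : Nat :=
  (u.length + 1) ^ (u.length - KB rules u x)

def SWB (rules : List (List Int)) (u : List Int) (l : List Int) : Nat :=
  (l.map (WB rules u)).sum

-- position-weighted measure of a working list, positions starting at k
def PhiO (rules : List (List Int)) (u : List Int) (k : Nat) (l : List Int) : Nat :=
  ((l.zipIdx k).map (fun p => p.2 * WB rules u p.1)).sum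

lemma edge_pairs (rules : List (List Int)) (y x : Int) :
    PySem.Set.contains (pairsB rules) (y, x) = edgeB rules y x := by
  rw [Bool.eq_iff_iff]
  simp [PySem.Set.contains, pairsB, PySem.Set.mem_ofList, List.mem_map, List.mem_filter,
    edgeB, List.any_eq_true, Prod.ext_iff]
  tauto

lemma edge_iff (rules : List (List Int)) (x y : Int) :
    edgeB rules x y = true ↔
      ∃ r ∈ rules, 2 ≤ r.length ∧ PySem.List.pyGetD r 0 0 = x ∧ PySem.List.pyGetD r 1 0 = y := by
  simp [edgeB, List.any_eq_true, and_assoc]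

lemma edge_of_mem (rules : List (List Int)) (r : List Int) (hr : r ∈ rules)
    (hlen : 2 ≤ r.length) :
    edgeB rules (PySem.List.pyGetD r 0 0) (PySem.List.pyGetD r 1 0) = true :=
  (edge_iff _ _ _).mpr ⟨r, hr, hlen, rfl, rfl⟩

lemma index_getD_of_mem (u : List Int) (x : Int) (h : x ∈ u) :
    (PySem.List.index? u x).getD 0 = u.idxOf x := by
  rw [PySem.List.index?_eq_idxOf?]
  have hs : (u.idxOf? x).isSome = true := by
    rw [← PySem.List.index?_eq_idxOf?]; exact (PySem.List.index?_isSome_iff u x).mpr h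
  obtain ⟨k, hk⟩ := Option.isSome_iff_exists.mp hs
  rw [hk]
  have := List.idxOf_eq_getD_idxOf? x u
  rw [hk] at this
  simp at this ⊢
  omega

lemma countP_lt_countP {α : Type} (l : List α) (p q : α → Bool)
    (hmono : ∀ z ∈ l, p z = true → q z = true) (a : α) (ha : a ∈ l)
    (hpa : p a = false) (hqa : q a = true) : l.countP p < l.countP q := by
  induction l with
  | nil => cases ha
  | cons x t ih =>
    rcases List.mem_cons.mp ha with rfl | hat
    · have h1 : t.countP p ≤ t.countP q :=
        List.countP_mono_left (fun z hz => hmono z (List.mem_cons_of_mem _ hz))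
      simp [hpa, hqa]; omega
    · have h2 := ih (fun z hz hp => hmono z (List.mem_cons_of_mem _ hz) hp) hat
      have hx := hmono x (List.mem_cons_self)
      simp only [List.countP_cons]
      cases hpx : p x <;> cases hqx : q x <;> simp_all <;> omega

lemma KB_lt (rules : List (List Int)) (u : List Int) (h : PreU rules u)
    (x y : Int) (hx : x ∈ u) (hy : y ∈ u) (hxy : edgeB rules x y = true) :
    KB rules u x < KB rules u y := by
  obtain ⟨hnd, htot, hasym, htrans⟩ := h
  refine countP_lt_countP u _ _ ?hmono x hx ?hpa ?hqa
  case hmono =>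
    intro z hz hpz
    rw [edge_pairs] at hpz ⊢
    exact htrans z hz x hx y hy hpz hxy
  case hpa =>
    rw [edge_pairs]
    by_contra hc
    simp only [Bool.not_eq_false] at hc
    exact hasym x hx x hx ⟨hc, hc⟩
  case hqa => rw [edge_pairs]; exact hxy

lemma KB_le_length (rules : List (List Int)) (u : List Int) (x : Int) :
    KB rules u x ≤ u.length := List.countP_le_length

-- verify's head behaviour
lemma verify_head (u : List Int) (rule : List Int) (rs : List (List Int)) :
    (violP u rule → verifyA u (rule :: rs) = (false, some rule)) ∧
    (¬ violP u rule → verifyA u (rule :: rs) = verifyA u rs) := by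
  by_cases h0 : PySem.List.pyGetD rule 0 0 ∈ u
  · by_cases h1 : PySem.List.pyGetD rule 1 0 ∈ u
    · by_cases hlt : u.idxOf (PySem.List.pyGetD rule 1 0) < u.idxOf (PySem.List.pyGetD rule 0 0)
      · constructor
        · intro _
          simp only [verifyA]
          rw [if_pos, if_pos]
          · rw [index_getD_of_mem u _ h0, index_getD_of_mem u _ h1]; omega
          · simp [h0, h1]
        · intro hnv; exact absurd ⟨h0, h1, hlt⟩ hnv
      · constructor
        · intro hv; exact absurd hv.2.2 hlt
        · intro _
          simp only [verifyA]
          rw [if_pos, if_neg]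
          · rw [index_getD_of_mem u _ h0, index_getD_of_mem u _ h1]; omega
          · simp [h0, h1]
    · constructor
      · intro hv; exact absurd hv.2.1 h1
      · intro _
        simp only [verifyA]
        rw [if_neg]
        simp [h0, h1]
  · constructor
    · intro hv; exact absurd hv.1 h0
    · intro _
      simp only [verifyA]
      rw [if_neg]
      simp [h0]


lemma verify_cases (u : List Int) (rs : List (List Int)) :
    (verifyA u rs = (true, none) ∧ ∀ r ∈ rs, ¬ violP u r) ∨
    (∃ r ∈ rs, verifyA u rs = (false, some r) ∧ violP u r) := by
  induction rs with
  | nil => left; exact ⟨rfl, by simp⟩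
  | cons rule rs ih =>
    by_cases hv : violP u rule
    · right; exact ⟨rule, List.mem_cons_self, (verify_head u rule rs).1 hv, hv⟩
    · rw [(verify_head u rule rs).2 hv] at *
      rcases ih with ⟨h1, h2⟩ | ⟨r, hr, he, hviol⟩
      · left
        refine ⟨h1, ?_⟩
        intro r hrm
        rcases List.mem_cons.mp hrm with rfl | hrt
        · exact hv
        · exact h2 r hrt
      · right; exact ⟨r, List.mem_cons_of_mem _ hr, he, hviol⟩


-- decomposition of a list around positions i < j
lemma list_decomp (v : List Int) (i j : Nat) (hij : i < j) (hj : j < v.length) :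
    v = v.take i ++ [v[i]'(by omega)] ++ ((v.drop (i+1)).take (j-i) ++ v.drop (j+1)) ∧
    v[j] ∈ (v.drop (i+1)).take (j-i) := by
  constructor
  · have h1 : v = v.take i ++ v.drop i := (List.take_append_drop i v).symm
    have h2 : v.drop i = v[i]'(by omega) :: v.drop (i+1) := List.drop_eq_getElem_cons (by omega)
    have h3 : v.drop (i+1) = (v.drop (i+1)).take (j-i) ++ (v.drop (i+1)).drop (j-i) :=
      (List.take_append_drop _ _).symm
    have h4 : (v.drop (i+1)).drop (j-i) = v.drop (j+1) := by
      rw [List.drop_drop]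
      congr 1
      omega
    rw [h4] at h3
    nth_rewrite 1 [h1, h2, h3]
    simp only [List.append_assoc, List.singleton_append]
  · have hlen : ((v.drop (i+1)).take (j-i)).length = j - i := by
      simp [List.length_take, List.length_drop]
      omega
    have hidx : j - i - 1 < ((v.drop (i+1)).take (j-i)).length := by omega
    have : ((v.drop (i+1)).take (j-i))[j-i-1]'hidx = v[j] := by
      rw [List.getElem_take, List.getElem_drop]
      congr 1
      omega
    rw [← this]
    exact List.getElem_mem hidx

lemma correctA_eq (v : List Int) (r : List Int) (hv : violP v r) :
    correctA v r = v.take (v.idxOf (PySem.List.pyGetD r 1 0)) ++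
      ((v.drop (v.idxOf (PySem.List.pyGetD r 1 0) + 1)).take
          (v.idxOf (PySem.List.pyGetD r 0 0) - v.idxOf (PySem.List.pyGetD r 1 0)) ++
        ([PySem.List.pyGetD r 1 0] ++ v.drop (v.idxOf (PySem.List.pyGetD r 0 0) + 1))) := by
  obtain ⟨h0, h1, hlt⟩ := hv
  set i := v.idxOf (PySem.List.pyGetD r 1 0) with hi
  set j := v.idxOf (PySem.List.pyGetD r 0 0) with hj
  unfold correctA
  dsimp only
  rw [index_getD_of_mem v _ h0, index_getD_of_mem v _ h1, ← hi, ← hj]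
  have e1 : ((i : Int) + 1) = ((i + 1 : Nat) : Int) := by push_cast; ring
  have e2 : ((j : Int) + 1) = ((j + 1 : Nat) : Int) := by push_cast; ring
  rw [e1, e2, PySem.List.slice_to_natCast, PySem.List.slice_natCast, PySem.List.slice_from_natCast]
  have e3 : j + 1 - (i + 1) = j - i := by omega
  rw [e3]
  simp [List.append_assoc]


lemma PhiO_nil (rules : List (List Int)) (u : List Int) (k : Nat) : PhiO rules u k [] = 0 := rfl

lemma PhiO_cons (rules : List (List Int)) (u : List Int) (k : Nat) (x : Int) (l : List Int) :
    PhiO rules u k (x :: l) = k * WB rules u x + PhiO rules u (k+1) l := by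
  simp [PhiO, List.zipIdx_cons]

lemma PhiO_append (rules : List (List Int)) (u : List Int) (k : Nat) (l1 l2 : List Int) :
    PhiO rules u k (l1 ++ l2) = PhiO rules u k l1 + PhiO rules u (k + l1.length) l2 := by
  simp [PhiO, List.zipIdx_append]

lemma PhiO_succ (rules : List (List Int)) (u : List Int) (k : Nat) (l : List Int) :
    PhiO rules u (k+1) l = PhiO rules u k l + SWB rules u l := by
  induction l generalizing k with
  | nil => simp [PhiO_nil, SWB]
  | cons x t ih =>
    rw [PhiO_cons, PhiO_cons, ih (k+1)]
    simp [SWB]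
    ring

lemma correct_perm (v : List Int) (r : List Int) (hv : violP v r) :
    (correctA v r).Perm v := by
  obtain ⟨h0, h1, hlt⟩ := hv
  have hjlen : v.idxOf (PySem.List.pyGetD r 0 0) < v.length := List.idxOf_lt_length_of_mem h0
  obtain ⟨hd, -⟩ := list_decomp v (v.idxOf (PySem.List.pyGetD r 1 0))
    (v.idxOf (PySem.List.pyGetD r 0 0)) hlt hjlen
  rw [List.getElem_idxOf (by omega)] at hd
  rw [correctA_eq v r ⟨h0, h1, hlt⟩]
  set i := v.idxOf (PySem.List.pyGetD r 1 0)
  set j := v.idxOf (PySem.List.pyGetD r 0 0)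
  set P := v.take i
  set M := (v.drop (i+1)).take (j-i)
  set S := v.drop (j+1)
  set b := PySem.List.pyGetD r 1 0
  have hperm : (M ++ ([b] ++ S)).Perm ([b] ++ (M ++ S)) := by
    rw [← List.append_assoc, ← List.append_assoc]
    exact List.perm_append_comm.append_right S
  calc (P ++ (M ++ ([b] ++ S))).Perm (P ++ ([b] ++ (M ++ S))) := hperm.append_left P
    _ = v := by rw [hd]; simp [List.append_assoc]

lemma Phi_correct_lt (rules : List (List Int)) (u : List Int) (h : PreU rules u)
    (v r : List Int) (hperm : v.Perm u) (hviol : violP v r)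
    (hE : edgeB rules (PySem.List.pyGetD r 0 0) (PySem.List.pyGetD r 1 0) = true) :
    PhiO rules u 0 (correctA v r) < PhiO rules u 0 v := by
  obtain ⟨h0, h1, hlt⟩ := hviol
  have hjlen : v.idxOf (PySem.List.pyGetD r 0 0) < v.length := List.idxOf_lt_length_of_mem h0
  obtain ⟨hd, hmem⟩ := list_decomp v (v.idxOf (PySem.List.pyGetD r 1 0))
    (v.idxOf (PySem.List.pyGetD r 0 0)) hlt hjlen
  rw [List.getElem_idxOf (by omega)] at hd
  rw [List.getElem_idxOf hjlen] at hmem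
  rw [correctA_eq v r ⟨h0, h1, hlt⟩]
  set r0 := PySem.List.pyGetD r 0 0 with hr0
  set r1 := PySem.List.pyGetD r 1 0 with hr1
  set i := v.idxOf r1 with hi
  set j := v.idxOf r0 with hj
  set P := v.take i with hP
  set M := (v.drop (i+1)).take (j-i) with hM
  set S := v.drop (j+1) with hS
  have hlen : v.length = u.length := hperm.length_eq
  have hPlen : P.length = i := by rw [hP]; simp; omega
  have hMlen : M.length = j - i := by rw [hM]; simp; omega
  -- key facts about the weights
  have hb_pos : 0 < WB rules u r1 := Nat.pow_pos (by omega)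
  have hK : KB rules u r0 < KB rules u r1 :=
    KB_lt rules u h r0 r1 (hperm.subset h0) (hperm.subset h1) hE
  have hKle : KB rules u r1 ≤ u.length := KB_le_length rules u r1
  have hWa : (u.length + 1) * WB rules u r1 ≤ WB rules u r0 := by
    unfold WB
    rw [← pow_succ']
    exact Nat.pow_le_pow_right (by omega) (by omega)
  have hWm : WB rules u r0 ≤ SWB rules u M :=
    List.single_le_sum (fun x _ => Nat.zero_le x) _ (List.mem_map_of_mem hmem)
  have hkey : (j - i) * WB rules u r1 < SWB rules u M := by
    have h1' : (j - i) * WB rules u r1 < (u.length + 1) * WB rules u r1 :=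
      (Nat.mul_lt_mul_right hb_pos).mpr (by omega)
    omega
  -- compute both measures
  have lhs_eq : PhiO rules u 0 (P ++ (M ++ ([r1] ++ S))) =
      PhiO rules u 0 P + (PhiO rules u i M +
        ((i + (j-i)) * WB rules u r1 + PhiO rules u (i + (j-i) + 1) S)) := by
    rw [PhiO_append, PhiO_append, PhiO_append, PhiO_cons, PhiO_nil, hPlen, hMlen]
    simp
  have rhs_eq : PhiO rules u 0 (P ++ [r1] ++ (M ++ S)) =
      PhiO rules u 0 P + (i * WB rules u r1 +
        ((PhiO rules u i M + SWB rules u M) + PhiO rules u (i + 1 + (j-i)) S)) := by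
    rw [PhiO_append, PhiO_append, PhiO_cons, PhiO_nil, PhiO_append]
    simp only [List.length_append, List.length_cons, List.length_nil, hPlen, hMlen,
      Nat.add_zero, Nat.zero_add]
    rw [PhiO_succ]
    ring
  have hoff : i + 1 + (j - i) = i + (j - i) + 1 := by omega
  rw [lhs_eq]
  conv_rhs => rw [hd]
  rw [rhs_eq, hoff, Nat.add_mul]
  linarith

lemma Phi_lt_fuel (rules : List (List Int)) (u : List Int) :
    PhiO rules u 0 u < (u.length + 1) ^ (u.length + 2) := by
  have hbound : PhiO rules u 0 u ≤ u.length * (u.length * (u.length + 1) ^ u.length) := by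
    have hterm : ∀ x ∈ (u.zipIdx 0).map (fun p => p.2 * WB rules u p.1),
        x ≤ u.length * (u.length + 1) ^ u.length := by
      intro x hx
      obtain ⟨⟨a, k⟩, hp, rfl⟩ := List.mem_map.mp hx
      obtain ⟨-, hk, -⟩ := List.mem_zipIdx hp
      have hW : WB rules u a ≤ (u.length + 1) ^ u.length :=
        Nat.pow_le_pow_right (by omega) (Nat.sub_le _ _)
      exact Nat.mul_le_mul (by omega) hW
    have := List.sum_le_card_nsmul _ _ hterm
    simpa [PhiO, smul_eq_mul] using this
  have h2 : u.length * u.length < (u.length + 1) ^ 2 := by nlinarith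
  calc PhiO rules u 0 u ≤ u.length * (u.length * (u.length + 1) ^ u.length) := hbound
    _ = (u.length * u.length) * (u.length + 1) ^ u.length := by ring
    _ < (u.length + 1) ^ 2 * (u.length + 1) ^ u.length :=
        (Nat.mul_lt_mul_right (Nat.pow_pos (by omega))).mpr h2
    _ = (u.length + 1) ^ (u.length + 2) := by rw [← pow_add]; congr 1; omega

lemma whileA_ok (rules : List (List Int)) (u : List Int) (h : PreU rules u)
    (hok : ruleOkU rules u) :
    ∀ (f : Nat) (v r : List Int), v.Perm u → violP v r → r ∈ rules →
      PhiO rules u 0 v < f →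
      (whileA rules f v r).Perm u ∧ ∀ r' ∈ rules, ¬ violP (whileA rules f v r) r' := by
  intro f
  induction f with
  | zero => intro v r _ _ _ hphi; exact absurd hphi (Nat.not_lt_zero _)
  | succ f ih =>
    intro v r hperm hviol hrm hphi
    have hlen2 : 2 ≤ r.length := by
      obtain ⟨hl1, hl2⟩ := hok r hrm
      rcases Nat.lt_or_ge r.length 2 with hlt | hge
      · have : r.length = 1 := by omega
        exact absurd (hperm.subset hviol.1) (hl2 this)
      · exact hge
    have hE := edge_of_mem rules r hrm hlen2
    have hperm' : (correctA v r).Perm u := (correct_perm v r hviol).trans hperm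
    have hdec : PhiO rules u 0 (correctA v r) < PhiO rules u 0 v :=
      Phi_correct_lt rules u h v r hperm hviol hE
    rcases verify_cases (correctA v r) rules with ⟨htrue, hnov⟩ | ⟨r', hr'm, heq, hviol'⟩
    · have hw : whileA rules (f+1) v r = correctA v r := by simp [whileA, htrue]
      rw [hw]; exact ⟨hperm', hnov⟩
    · have hw : whileA rules (f+1) v r = whileA rules f (correctA v r) r' := by
        simp [whileA, heq]
      rw [hw]
      exact ih (correctA v r) r' hperm' hviol' hr'm (by omega)

lemma sorted_eq_of_noviol (rules : List (List Int)) (u : List Int) (h : PreU rules u)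
    (v : List Int) (hp : v.Perm u) (hnv : ∀ r ∈ rules, ¬ violP v r) :
    PySem.List.sorted u (keyB rules u) = v := by
  obtain ⟨hnd, htot, hasym, htrans⟩ := h
  have hndv : v.Nodup := (hp.nodup_iff).mpr hnd
  apply PySem.List.sorted_eq_of_perm_of_pairwise_lt u v _ hp
  rw [List.pairwise_iff_getElem]
  intro i j hi hj hij
  have hmemi : v[i] ∈ u := hp.subset (List.getElem_mem hi)
  have hmemj : v[j] ∈ u := hp.subset (List.getElem_mem hj)
  have hne : v[i] ≠ v[j] := by
    intro hcontra
    have := (List.Nodup.getElem_inj_iff hndv).mp hcontra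
    omega
  have hnback : ¬ edgeB rules v[j] v[i] = true := by
    intro hEb
    obtain ⟨r, hr, hlen2, he0, he1⟩ := (edge_iff rules _ _).mp hEb
    apply hnv r hr
    refine ⟨?_, ?_, ?_⟩
    · rw [he0]; exact List.getElem_mem hj
    · rw [he1]; exact List.getElem_mem hi
    · rw [he0, he1, List.Nodup.idxOf_getElem hndv i hi, List.Nodup.idxOf_getElem hndv j hj]
      omega
  have hEf : edgeB rules v[i] v[j] = true := by
    rcases htot _ hmemi _ hmemj hne with hgood | hbad
    · exact hgood
    · exact absurd hbad hnback
  have hKlt := KB_lt rules u ⟨hnd, htot, hasym, htrans⟩ _ _ hmemi hmemj hEf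
  show keyB rules u v[i] < keyB rules u v[j]
  unfold keyB
  unfold KB at hKlt
  exact_mod_cast hKlt

lemma posB_fold (u : List Int) (s : Int) (d : PySem.Dict Int Int) (x : Int) :
    ((PySem.List.enumerate u s).foldl
        (fun pos p => if pos.contains p.2 then pos else pos.insert p.2 p.1) d).get? x =
      if d.contains x then d.get? x
      else if x ∈ u then some (s + (u.idxOf x : Int)) else none := by
  induction u generalizing s d with
  | nil =>
    rw [PySem.List.enumerate_nil]
    simp only [List.foldl_nil, List.not_mem_nil, if_false]
    split_ifs with hc
    · rfl
    · exact (PySem.Dict.get?_eq_none_iff_contains d x).mpr (by simpa using hc)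
  | cons y t ih =>
    rw [PySem.List.enumerate_cons]
    simp only [List.foldl_cons]
    by_cases hc : d.contains y = true
    · rw [if_pos hc, ih]
      by_cases hx : d.contains x = true
      · rw [if_pos hx, if_pos hx]
      · have hxy : x ≠ y := by rintro rfl; exact hx hc
        rw [if_neg hx, if_neg hx]
        simp only [List.mem_cons, hxy, false_or]
        split_ifs with hxt
        · rw [List.idxOf_cons_ne t (Ne.symm hxy)]
          congr 1
          push_cast [Nat.succ_eq_add_one]
          ring
        · rfl
    · rw [if_neg hc, ih]
      by_cases hxy : x = y
      · subst hxy
        rw [if_pos (PySem.Dict.contains_insert_self d x s), PySem.Dict.get?_insert_self,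
          if_neg (by simp [hc]), if_pos (List.mem_cons_self), List.idxOf_cons_eq t rfl]
        norm_num
      · rw [PySem.Dict.contains_insert, PySem.Dict.get?_insert_of_ne d s hxy]
        rw [show (x == y) = false from by simpa using hxy, Bool.false_or]
        by_cases hx : d.contains x = true
        · rw [if_pos hx, if_pos hx]
        · rw [if_neg hx, if_neg hx]
          simp only [List.mem_cons, hxy, false_or]
          split_ifs with hxt
          · rw [List.idxOf_cons_ne t (Ne.symm hxy)]
            congr 1
            push_cast [Nat.succ_eq_add_one]
            ring
          · rfl

lemma posB_get? (u : List Int) (x : Int) :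
    (posB u).get? x = if x ∈ u then some (u.idxOf x : Int) else none := by
  rw [posB, posB_fold]
  simp [PySem.Dict.contains_empty]

lemma posB_contains (u : List Int) (x : Int) : (posB u).contains x = decide (x ∈ u) := by
  rw [PySem.Dict.contains_eq_isSome_get?, posB_get?]
  by_cases hx : x ∈ u <;> simp [hx]

lemma posB_getD (u : List Int) (x : Int) (hx : x ∈ u) :
    (posB u).getD x 0 = (u.idxOf x : Int) := by
  rw [PySem.Dict.getD_eq_get?_getD, posB_get?, if_pos hx]
  rfl

lemma okB_iff (rules : List (List Int)) (u : List Int) (hok : ruleOkU rules u) :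
    okB rules u = true ↔ ∀ r ∈ rules, ¬ violP u r := by
  rw [okB, List.all_eq_true]
  constructor
  · intro hall r hrm hviol
    obtain ⟨h0, h1, hlt⟩ := hviol
    have hlen2 : 2 ≤ r.length := by
      obtain ⟨hl1, hl2⟩ := hok r hrm
      rcases Nat.lt_or_ge r.length 2 with hlt' | hge
      · exact absurd h0 (hl2 (by omega))
      · exact hge
    have hp : (PySem.List.pyGetD r 0 0, PySem.List.pyGetD r 1 0) ∈ pairsB rules := by
      rw [pairsB, PySem.Set.mem_ofList, List.mem_map]
      exact ⟨r, List.mem_filter.mpr ⟨hrm, by simpa using hlen2⟩, rfl⟩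
    have := hall _ hp
    rw [Bool.not_eq_eq_eq_not, Bool.not_true, Bool.and_eq_false_iff, Bool.and_eq_false_iff] at this
    rcases this with (hcf | hcf) | hcf
    · rw [posB_contains] at hcf; simp [h0] at hcf
    · rw [posB_contains] at hcf; simp [h1] at hcf
    · rw [posB_getD u _ h0, posB_getD u _ h1] at hcf
      simp at hcf
      have : (u.idxOf (PySem.List.pyGetD r 1 0) : Int) < (u.idxOf (PySem.List.pyGetD r 0 0) : Int) := by
        exact_mod_cast hlt
      omega
  · intro hnov p hp
    rw [pairsB, PySem.Set.mem_ofList, List.mem_map] at hp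
    obtain ⟨r, hrf, rfl⟩ := hp
    rw [List.mem_filter] at hrf
    rw [Bool.not_eq_eq_eq_not, Bool.not_true, Bool.and_eq_false_iff, Bool.and_eq_false_iff]
    by_cases h0 : PySem.List.pyGetD r 0 0 ∈ u
    · by_cases h1 : PySem.List.pyGetD r 1 0 ∈ u
      · right
        rw [posB_getD u _ h0, posB_getD u _ h1]
        have hnlt := fun hlt => hnov r hrf.1 ⟨h0, h1, hlt⟩
        simp only [decide_eq_false_iff_not, not_lt]
        have : u.idxOf (PySem.List.pyGetD r 0 0) ≤ u.idxOf (PySem.List.pyGetD r 1 0) := by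
          by_contra hgt
          exact hnlt (by omega)
        exact_mod_cast this
      · left; right; rw [posB_contains]; simpa using h1
    · left; left; rw [posB_contains]; simpa using h0

lemma noViol_of_ruleOk (rules : List (List Int)) (u : List Int) (hok : ruleOkU rules u)
    (hnv : noViolU rules u) : ∀ r ∈ rules, ¬ violP u r := by
  intro r hrm hviol
  obtain ⟨h0, h1, hlt⟩ := hviol
  have hlen2 : 2 ≤ r.length := by
    obtain ⟨hl1, hl2⟩ := hok r hrm
    rcases Nat.lt_or_ge r.length 2 with hlt' | hge
    · exact absurd h0 (hl2 (by omega))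
    · exact hge
  exact hnv r hrm hlen2 h0 h1 hlt

lemma stepA_eq_stepB (rules : List (List Int)) (u : List Int)
    (hok : ruleOkU rules u) (hdisj : noViolU rules u ∨ PreU rules u)
    (acc : List (List Int) × List (List Int)) : stepA rules acc u = stepB rules acc u := by
  rcases verify_cases u rules with ⟨htrue, hnov⟩ | ⟨r, hrm, heq, hviol⟩
  · have hokb : okB rules u = true := (okB_iff rules u hok).mpr hnov
    simp [stepA, stepB, htrue, hokb]
  · have hokb : okB rules u = false := by
      rw [Bool.eq_false_iff]
      intro htrue
      exact (okB_iff rules u hok).mp htrue r hrm hviol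
    have hpre : PreU rules u := by
      rcases hdisj with hnv | hp
      · exact absurd hviol (noViol_of_ruleOk rules u hok hnv r hrm)
      · exact hp
    have hwok := whileA_ok rules u hpre hok ((u.length + 1) ^ (u.length + 2)) u r
      (List.Perm.refl u) hviol hrm (Phi_lt_fuel rules u)
    have hfix : PySem.List.sorted u (keyB rules u) =
        whileA rules ((u.length + 1) ^ (u.length + 2)) u r :=
      sorted_eq_of_noviol rules u hpre _ hwok.1 hwok.2
    simp [stepA, stepB, heq, hokb, hfix]

-- ===== VERDICT (by name: the statement is the Claim_ definition above) =====
theorem divide_updates_spec : Claim_equal_divide_updates := by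
  intro updates rules _ hpre
  unfold Spec_divide_updates divide_updates divide_updates_alt
  exact (PySem.List.foldl_congr_mem updates (stepA rules) (stepB rules) ([], [])
    (fun acc u hu => stepA_eq_stepB rules u (hpre u hu).1 (hpre u hu).2 acc)).symm ▸ rfl
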